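-- pv_equiv track=rewrite | github.com/seyzzv/study | Python3/프로그래머스/0/181881. 조건에 맞게 수열 변환하기 2/조건에 맞게 수열 변환하기 2.py | solution
-- ===== SOURCE A (Python) =====
-- def solution(arr):
--     answer = 0
--     while True:
--         changed = False
--         for i in range(len(arr)):
--             x = arr[i]
--             if x >= 50 and x % 2 == 0:
--                 arr[i] = x // 2
--                 changed = True
--             elif x < 50 and x % 2 == 1:
--                 arr[i] = x * 2 + 1
--                 changed = True
--         if not changed:
--             return answer
--         answer += 1
-- ===== SOURCE B (Python) =====
-- def solution(arr):
--     best = 0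
--     for x in arr:
--         c = 0
--         while True:
--             if x >= 50 and x % 2 == 0:
--                 x //= 2
--             elif x < 50 and x % 2 == 1:
--                 x = x * 2 + 1
--             else:
--                 break
--             c += 1
--         best = max(best, c)
--     return best
-- ===== Notes on version B (the rewrite author's own statement) =====
-- stated objective: alternative
-- what changed: A repeatedly sweeps the whole array, one global round per counted step; B simulates each element independently to its fixed point and returns the maximum per-element step count, so each element is visited only as often as it moves (fewer element visits, though not measurably faster here). Pre_ excludes arrays containing a negative odd element, on which A's while-loop never terminates (x*2+1 keeps a negative odd number negative and odd); B diverges there too. A also mutates its argument in place; B does not, and the equivalence is about the return value only.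
import Mathlib
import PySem

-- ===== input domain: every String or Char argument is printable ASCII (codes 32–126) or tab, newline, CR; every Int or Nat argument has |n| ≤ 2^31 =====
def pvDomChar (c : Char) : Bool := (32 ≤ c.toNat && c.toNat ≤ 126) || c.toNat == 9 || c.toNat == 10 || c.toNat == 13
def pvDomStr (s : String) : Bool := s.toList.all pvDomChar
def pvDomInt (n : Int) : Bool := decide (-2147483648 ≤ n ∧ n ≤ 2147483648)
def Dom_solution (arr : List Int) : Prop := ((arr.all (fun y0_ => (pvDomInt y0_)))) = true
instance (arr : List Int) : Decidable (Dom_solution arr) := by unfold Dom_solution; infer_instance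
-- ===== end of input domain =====

-- B replaces A's repeated whole-array sweeps by an independent per-element simulation
-- (answer = max per-element step count), so each element is visited only as often as it
-- moves; the equivalence is about the RETURN value only (Python A mutates its argument
-- in place, B does not).

-- fuel bound: any array element admitted by Dom_solution reaches its fixed point in
-- far fewer steps than this (proved below via the measure `meas`)
def pvFuel : Nat := 2147483712

-- ===== PORT A =====
-- one sweep of the for-loop over the indices: new array plus the `changed` flag
def roundA : List Int → List Int × Bool
  | [] => ([], false)
  | x :: xs =>
    if 50 ≤ x ∧ PySem.Int.mod x 2 = 0 then
      let r := roundA xs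
      (PySem.Int.floordiv x 2 :: r.1, true)
    else if x < 50 ∧ PySem.Int.mod x 2 = 1 then
      let r := roundA xs
      ((x * 2 + 1) :: r.1, true)
    else
      let r := roundA xs
      (x :: r.1, r.2)

-- the `while True` loop (fuel only makes it total; under Pre_ it is never exhausted)
def loopA : Nat → List Int → Int → Int
  | 0, _, ans => ans
  | fuel + 1, arr, ans =>
    let r := roundA arr
    if r.2 then loopA fuel r.1 (ans + 1) else ans

def solution (arr : List Int) : Int := loopA pvFuel arr 0

-- ===== PORT B =====
-- the inner `while True` of B: number of steps x takes to reach its fixed point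
def stepCount : Nat → Int → Nat
  | 0, _ => 0
  | fuel + 1, x =>
    if 50 ≤ x ∧ PySem.Int.mod x 2 = 0 then stepCount fuel (PySem.Int.floordiv x 2) + 1
    else if x < 50 ∧ PySem.Int.mod x 2 = 1 then stepCount fuel (x * 2 + 1) + 1
    else 0

def solution_alt (arr : List Int) : Int :=
  Int.ofNat (arr.foldl (fun best x => max best (stepCount pvFuel x)) 0)

-- ===== PRECONDITION & SPEC =====
-- Pre_ excludes arrays containing a negative odd element: on those A's while-loop never
-- terminates (x*2+1 keeps a negative odd number negative and odd), so A returns nothing.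
def Pre_solution (arr : List Int) : Prop := ∀ x ∈ arr, 0 ≤ x ∨ PySem.Int.mod x 2 = 0
instance (arr : List Int) : Decidable (Pre_solution arr) := by unfold Pre_solution; infer_instance

def pvWitness_solution : List Int := [1, 100, -4, 51, 0]

def Spec_solution (arr : List Int) (out : Int) : Prop := out = solution_alt arr
instance (arr : List Int) (out : Int) : Decidable (Spec_solution arr out) := by unfold Spec_solution; infer_instance

-- ===== CLAIM (what is proved, stated in full; the proofs are below) =====
def Claim_equal_solution : Prop := ∀ (arr : List Int), Dom_solution arr → Pre_solution arr → Spec_solution arr (solution arr)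

-- ===== LEMMAS AND PROOFS =====

-- an element is "good" when it is nonnegative or even (Pre_) and bounded (Dom_)
def pvG (x : Int) : Prop := (0 ≤ x ∨ PySem.Int.mod x 2 = 0) ∧ x ≤ 2147483648

-- the per-element transition (identity on fixed points)
def pvStp (x : Int) : Int :=
  if 50 ≤ x ∧ PySem.Int.mod x 2 = 0 then PySem.Int.floordiv x 2
  else if x < 50 ∧ PySem.Int.mod x 2 = 1 then x * 2 + 1
  else x

-- does x still move?
def pvMv (x : Int) : Bool :=
  decide (50 ≤ x ∧ PySem.Int.mod x 2 = 0) || decide (x < 50 ∧ PySem.Int.mod x 2 = 1)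

-- termination measure: strictly decreases along pvStp on good moving elements
def pvMeas (x : Int) : Nat :=
  if pvMv x then (if 50 ≤ x then x.toNat else (50 - x).toNat) else 0

theorem pv_mod_two (x : Int) : PySem.Int.mod x 2 = x % 2 :=
  PySem.Int.mod_eq_emod_of_pos (by norm_num)

theorem pv_fd_two (x : Int) : PySem.Int.floordiv x 2 = x / 2 :=
  PySem.Int.floordiv_eq_ediv_of_pos (by norm_num)

theorem pvStp_good (x : Int) (hg : pvG x) : pvG (pvStp x) := by
  rcases hg with ⟨h1, h2⟩
  simp only [pvG, pvStp, pv_mod_two, pv_fd_two] at *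
  split_ifs with ha hb <;> omega

theorem pvMeas_dec (x : Int) (hg : pvG x) (hm : pvMv x = true) :
    pvMeas (pvStp x) < pvMeas x := by
  rcases hg with ⟨h1, h2⟩
  simp only [pvMeas, pvMv, pvStp, pv_mod_two, pv_fd_two, Bool.or_eq_true,
    decide_eq_true_eq] at *
  split_ifs at * <;> omega

theorem pvMeas_lt_fuel (x : Int) (hg : pvG x) : pvMeas x < pvFuel := by
  rcases hg with ⟨h1, h2⟩
  simp only [pvMeas, pvMv, pv_mod_two, Bool.or_eq_true, decide_eq_true_eq, pvFuel] at *
  split_ifs at * <;> omega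

theorem stepCount_fixed (f : Nat) (x : Int) (h : pvMv x = false) : stepCount f x = 0 := by
  cases f with
  | zero => rfl
  | succ m =>
    simp only [pvMv, Bool.or_eq_false_iff, decide_eq_false_iff_not] at h
    simp only [stepCount]
    rw [if_neg h.1, if_neg h.2]

theorem stepCount_stable (n f₁ f₂ : Nat) (x : Int) (hg : pvG x)
    (hn : pvMeas x ≤ n) (h₁ : pvMeas x < f₁) (h₂ : pvMeas x < f₂) :
    stepCount f₁ x = stepCount f₂ x := by
  induction n generalizing x f₁ f₂ with
  | zero =>
    have hm : pvMv x = false := by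
      cases hmv : pvMv x
      · rfl
      · have := pvMeas_dec x hg hmv; omega
    rw [stepCount_fixed _ _ hm, stepCount_fixed _ _ hm]
  | succ n ih =>
    cases hm : pvMv x with
    | false => rw [stepCount_fixed _ _ hm, stepCount_fixed _ _ hm]
    | true =>
      obtain ⟨m₁, rfl⟩ := Nat.exists_eq_succ_of_ne_zero (by omega : f₁ ≠ 0)
      obtain ⟨m₂, rfl⟩ := Nat.exists_eq_succ_of_ne_zero (by omega : f₂ ≠ 0)
      have hg' := pvStp_good x hg
      have hd := pvMeas_dec x hg hm
      simp only [pvMv, Bool.or_eq_true, decide_eq_true_eq] at hm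
      by_cases hc : 50 ≤ x ∧ PySem.Int.mod x 2 = 0
      · have hs : pvStp x = PySem.Int.floordiv x 2 := by
          simp only [pvStp]; rw [if_pos hc]
        rw [hs] at hg' hd
        simp only [stepCount]
        rw [if_pos hc, if_pos hc,
          ih m₁ m₂ (PySem.Int.floordiv x 2) hg' (by omega) (by omega) (by omega)]
      · have hc2 : x < 50 ∧ PySem.Int.mod x 2 = 1 := hm.resolve_left hc
        have hs : pvStp x = x * 2 + 1 := by
          simp only [pvStp]; rw [if_neg hc, if_pos hc2]
        rw [hs] at hg' hd
        simp only [stepCount]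
        rw [if_neg hc, if_neg hc, if_pos hc2, if_pos hc2,
          ih m₁ m₂ (x * 2 + 1) hg' (by omega) (by omega) (by omega)]

theorem stepCount_succ (f : Nat) (x : Int) (hg : pvG x) (hm : pvMv x = true)
    (hf : pvMeas x < f) : stepCount f x = stepCount f (pvStp x) + 1 := by
  obtain ⟨m, rfl⟩ := Nat.exists_eq_succ_of_ne_zero (by omega : f ≠ 0)
  have hg' := pvStp_good x hg
  have hd := pvMeas_dec x hg hm
  simp only [pvMv, Bool.or_eq_true, decide_eq_true_eq] at hm
  by_cases hc : 50 ≤ x ∧ PySem.Int.mod x 2 = 0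
  · have hs : pvStp x = PySem.Int.floordiv x 2 := by
      simp only [pvStp]; rw [if_pos hc]
    rw [hs] at hg' hd ⊢
    have h1 : stepCount (m + 1) x = stepCount m (PySem.Int.floordiv x 2) + 1 := by
      simp only [stepCount]; rw [if_pos hc]
    rw [h1, stepCount_stable (pvMeas (PySem.Int.floordiv x 2)) m (m + 1) _ hg' le_rfl
      (by omega) (by omega)]
  · have hc2 : x < 50 ∧ PySem.Int.mod x 2 = 1 := hm.resolve_left hc
    have hs : pvStp x = x * 2 + 1 := by
      simp only [pvStp]; rw [if_neg hc, if_pos hc2]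
    rw [hs] at hg' hd ⊢
    have h1 : stepCount (m + 1) x = stepCount m (x * 2 + 1) + 1 := by
      simp only [stepCount]; rw [if_neg hc, if_pos hc2]
    rw [h1, stepCount_stable (pvMeas (x * 2 + 1)) m (m + 1) _ hg' le_rfl (by omega)
      (by omega)]

-- count after one step = count - 1, for every good element (moving or already fixed)
theorem stepCount_stp (x : Int) (hg : pvG x) :
    stepCount pvFuel (pvStp x) = stepCount pvFuel x - 1 := by
  by_cases hm : pvMv x = true
  · rw [stepCount_succ pvFuel x hg hm (pvMeas_lt_fuel x hg)]; omega
  · have hm' : pvMv x = false := by revert hm; cases pvMv x <;> simp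
    have hs : pvStp x = x := by
      simp only [pvMv, Bool.or_eq_false_iff, decide_eq_false_iff_not] at hm'
      simp only [pvStp]; rw [if_neg hm'.1, if_neg hm'.2]
    rw [hs, stepCount_fixed _ _ hm']

theorem roundA_fst (arr : List Int) : (roundA arr).1 = arr.map pvStp := by
  induction arr with
  | nil => rfl
  | cons x xs ih =>
    simp only [roundA, pvStp, List.map]
    split_ifs with h1 h2 <;> simp [ih]

theorem roundA_snd (arr : List Int) : (roundA arr).2 = arr.any pvMv := by
  induction arr with
  | nil => rfl
  | cons x xs ih =>
    simp only [roundA, List.any_cons]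
    split_ifs with h1 h2
    · have hm : pvMv x = true := by
        simp only [pvMv, Bool.or_eq_true, decide_eq_true_eq]; exact Or.inl h1
      simp [hm]
    · have hm : pvMv x = true := by
        simp only [pvMv, Bool.or_eq_true, decide_eq_true_eq]; exact Or.inr h2
      simp [hm]
    · have hm : pvMv x = false := by
        simp only [pvMv, Bool.or_eq_false_iff, decide_eq_false_iff_not]
        exact ⟨h1, h2⟩
      simp [hm, ih]

theorem foldl_max_mono (g : Int → Nat) (arr : List Int) (b : Nat) :
    b ≤ arr.foldl (fun b x => max b (g x)) b := by
  induction arr generalizing b with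
  | nil => simp
  | cons y ys ih =>
    simp only [List.foldl_cons]
    exact le_trans (le_max_left b (g y)) (ih _)

theorem foldl_max_le (g : Int → Nat) (arr : List Int) (b : Nat) (x : Int)
    (hx : x ∈ arr) : g x ≤ arr.foldl (fun b x => max b (g x)) b := by
  induction arr generalizing b with
  | nil => cases hx
  | cons y ys ih =>
    simp only [List.foldl_cons]
    rcases List.mem_cons.mp hx with rfl | h
    · exact le_trans (le_max_right b (g x)) (foldl_max_mono g ys _)
    · exact ih _ h

theorem foldl_max_pred (g : Int → Nat) (arr : List Int) (b : Nat) :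
    arr.foldl (fun b x => max b (g x)) b - 1
      = arr.foldl (fun b x => max b (g x - 1)) (b - 1) := by
  induction arr generalizing b with
  | nil => rfl
  | cons y ys ih =>
    simp only [List.foldl_cons]
    rw [ih (max b (g y))]
    congr 1
    omega

theorem foldl_congr_fn (g h : Int → Nat) (arr : List Int) (b : Nat)
    (he : ∀ x ∈ arr, g x = h x) :
    arr.foldl (fun b x => max b (g x)) b = arr.foldl (fun b x => max b (h x)) b := by
  induction arr generalizing b with
  | nil => rfl
  | cons y ys ih =>
    simp only [List.foldl_cons, he y (by simp)]
    exact ih _ (fun x hx => he x (by simp [hx]))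

theorem loopA_eq (f : Nat) (arr : List Int) (ans : Int)
    (hg : ∀ x ∈ arr, pvG x)
    (hf : ∀ x ∈ arr, stepCount pvFuel x < f) :
    loopA f arr ans
      = ans + Int.ofNat (arr.foldl (fun b x => max b (stepCount pvFuel x)) 0) := by
  induction f generalizing arr ans with
  | zero =>
    cases arr with
    | nil => simp [loopA]
    | cons y ys => exact absurd (hf y (by simp)) (by omega)
  | succ m ih =>
    by_cases hch : arr.any pvMv = true
    · obtain ⟨y, hy, hmy⟩ := List.any_eq_true.mp hch
      simp only [loopA, roundA_snd, hch, if_true, roundA_fst]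
      have hcy : 1 ≤ stepCount pvFuel y := by
        rw [stepCount_succ pvFuel y (hg y hy) hmy (pvMeas_lt_fuel y (hg y hy))]; omega
      have hMy := foldl_max_le (stepCount pvFuel) arr 0 y hy
      rw [ih (arr.map pvStp) (ans + 1)
        (by intro x hx; obtain ⟨z, hz, rfl⟩ := List.mem_map.mp hx; exact pvStp_good z (hg z hz))
        (by intro x hx; obtain ⟨z, hz, rfl⟩ := List.mem_map.mp hx
            rw [stepCount_stp z (hg z hz)]
            have h1 := hf z hz
            have h2 := hf y hy
            omega)]
      simp only [List.foldl_map]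
      have hrw : arr.foldl (fun b x => max b (stepCount pvFuel (pvStp x))) 0
          = arr.foldl (fun b x => max b (stepCount pvFuel x - 1)) 0 :=
        foldl_congr_fn (fun z => stepCount pvFuel (pvStp z))
          (fun z => stepCount pvFuel z - 1) arr 0
          (fun z hz => stepCount_stp z (hg z hz))
      rw [hrw]
      have hp : arr.foldl (fun b x => max b (stepCount pvFuel x - 1)) 0
          = arr.foldl (fun b x => max b (stepCount pvFuel x)) 0 - 1 := by
        have h := foldl_max_pred (stepCount pvFuel) arr 0
        simpa using h.symm
      rw [hp]
      simp only [Int.ofNat_eq_natCast]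
      omega
    · have hch' : arr.any pvMv = false := by
        cases h : arr.any pvMv
        · rfl
        · exact absurd h hch
      simp only [loopA, roundA_snd, hch']
      have h0 : arr.foldl (fun b x => max b (stepCount pvFuel x)) 0 = 0 := by
        have hz : arr.foldl (fun b x => max b (stepCount pvFuel x)) 0
            = arr.foldl (fun b x => max b ((fun _ => (0 : Nat)) x)) 0 :=
          foldl_congr_fn (stepCount pvFuel) (fun _ => 0) arr 0
            (fun z hz => stepCount_fixed pvFuel z
              (by have := List.any_eq_false.mp hch' z hz
                  revert this; cases pvMv z <;> simp))
        rw [hz]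
        clear hch hch' hg hf ih hz
        induction arr with
        | nil => rfl
        | cons y ys ih2 => simp only [List.foldl_cons, Nat.max_self]; exact ih2
      rw [h0]
      simp

theorem stepCount_le_meas (n : Nat) (x : Int) (hg : pvG x) (hn : pvMeas x ≤ n) :
    stepCount pvFuel x ≤ pvMeas x := by
  induction n generalizing x with
  | zero =>
    cases hmv : pvMv x with
    | false => rw [stepCount_fixed _ _ hmv]; omega
    | true => have := pvMeas_dec x hg hmv; omega
  | succ n ih =>
    cases hmv : pvMv x with
    | false => rw [stepCount_fixed _ _ hmv]; omega
    | true =>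
      have hd := pvMeas_dec x hg hmv
      rw [stepCount_succ pvFuel x hg hmv (pvMeas_lt_fuel x hg)]
      have := ih (pvStp x) (pvStp_good x hg) (by omega)
      omega

-- ===== VERDICT (by name: the statement is the Claim_ definition above) =====
theorem solution_spec : Claim_equal_solution := by
  intro arr hdom hpre
  unfold Spec_solution solution solution_alt
  have hg : ∀ x ∈ arr, pvG x := by
    intro x hx
    refine ⟨hpre x hx, ?_⟩
    have := List.all_eq_true.mp hdom x hx
    simp only [pvDomInt, decide_eq_true_eq] at this
    omega
  have h := loopA_eq pvFuel arr 0 hg ?_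
  · simpa using h
  intro x hx
  have h1 := stepCount_le_meas (pvMeas x) x (hg x hx) le_rfl
  have := pvMeas_lt_fuel x (hg x hx)
  omega
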